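-- pv_equiv track=rewrite | github.com/ImKhisam/codewars | Catching Car Mileage Numbers/my_solution.py | sequential_decrementing_digits
-- ===== SOURCE A (Python) =====
-- def sequential_decrementing_digits(number):
--     if number > 99:
--         for i in range(1, len(str(number))):
--             if int(str(number)[i - 1]) != int(str(number)[i]) + 1:
--                 if int(str(number)[i - 1]) == 1 and int(str(number)[i]) == 0:
--                     continue
--                 return False
--         return True
--     else:
--         return False
-- ===== SOURCE B (Python) =====
-- def sequential_decrementing_digits(number):
--     if number <= 99:
--         return False
--     s = str(number)
--     f = int(s[0])
--     if f - (len(s) - 1) < 0: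
--         return False
--     return s == ''.join(str(f - k) for k in range(len(s)))
-- ===== Notes on version B (the rewrite author's own statement) =====
-- stated objective: simpler
-- what changed: Instead of scanning adjacent digit pairs (recomputing str(number) and int() for every index), B constructs the unique sequentially-decrementing string determined by the first digit and the length, and compares it to str(number) once.
import Mathlib
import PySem

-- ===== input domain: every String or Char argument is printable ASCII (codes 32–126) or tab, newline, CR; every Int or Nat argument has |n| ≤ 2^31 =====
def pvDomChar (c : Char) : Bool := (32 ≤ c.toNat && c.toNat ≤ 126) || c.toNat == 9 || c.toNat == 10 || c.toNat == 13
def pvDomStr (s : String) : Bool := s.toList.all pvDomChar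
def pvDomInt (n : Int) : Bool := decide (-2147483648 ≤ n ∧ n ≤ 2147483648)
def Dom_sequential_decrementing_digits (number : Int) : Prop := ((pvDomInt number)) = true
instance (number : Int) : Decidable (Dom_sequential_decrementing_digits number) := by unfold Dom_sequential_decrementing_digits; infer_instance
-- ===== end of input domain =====

-- B replaces A's adjacent-digit-pair scan by constructing the unique sequentially-decrementing
-- digit string fixed by the first digit and the length and comparing it once (objective: simpler).

-- int(str(number)[i]) — shared primitive of both ports; whenever either port evaluates it the
-- index is in range and the character is a decimal digit (number > 99), so `.getD 0` never fires.
def pvIntAt (cs : List Char) (i : Int) : Int :=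
  ((PySem.List.pyGet? cs i).bind (fun c => PySem.Int.ofChars? [c])).getD 0

-- ===== PORT A =====
-- the for-loop over range(1, len(str(number))) with its continue / early return
def pvLoopA (cs : List Char) : List Int → Bool
  | [] => true
  | i :: rest =>
    if pvIntAt cs (i - 1) ≠ pvIntAt cs i + 1 then
      if pvIntAt cs (i - 1) = 1 ∧ pvIntAt cs i = 0 then pvLoopA cs rest
      else false
    else pvLoopA cs rest

def sequential_decrementing_digits (number : Int) : Bool :=
  if number > 99 then
    pvLoopA (PySem.Int.toChars number)
      (PySem.List.pyRange 1 ((PySem.Int.toChars number).length : Int) 1)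
  else false

-- ===== PORT B =====
def sequential_decrementing_digits_alt (number : Int) : Bool :=
  if number ≤ 99 then false
  else
    let cs := PySem.Int.toChars number          -- s = str(number)
    let f := pvIntAt cs 0                       -- f = int(s[0])
    if f - ((cs.length : Int) - 1) < 0 then false
    else cs = PySem.Chars.join []
      ((PySem.List.pyRange 0 (cs.length : Int) 1).map (fun k => PySem.Int.toChars (f - k)))

-- ===== PRECONDITION & SPEC =====
def Spec_sequential_decrementing_digits (number : Int) (out : Bool) : Prop := out = sequential_decrementing_digits_alt number
instance (number : Int) (out : Bool) : Decidable (Spec_sequential_decrementing_digits number out) := by unfold Spec_sequential_decrementing_digits; infer_instance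

-- ===== CLAIM (what is proved, stated in full; the proofs are below) =====
def Claim_equal_sequential_decrementing_digits : Prop := ∀ (number : Int), Dom_sequential_decrementing_digits number → Spec_sequential_decrementing_digits number (sequential_decrementing_digits number)

-- ===== LEMMAS AND PROOFS =====

def pvDigits : List Char := ['0','1','2','3','4','5','6','7','8','9']
def pvVal (c : Char) : Int := (c.toNat : Int) - 48
def pvChr (v : Int) : Char := Nat.digitChar v.toNat

theorem pvDigitChar_mem : ∀ m : Fin 10, Nat.digitChar m.val ∈ pvDigits := by decide

theorem pvToDigitsCore_digits (f : Nat) : ∀ (n : Nat) (acc : List Char),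
    (∀ c ∈ acc, c ∈ pvDigits) → ∀ c ∈ Nat.toDigitsCore 10 f n acc, c ∈ pvDigits := by
  induction f with
  | zero => intro n acc hacc; simpa [Nat.toDigitsCore] using hacc
  | succ f ih =>
    intro n acc hacc c hc
    simp only [Nat.toDigitsCore] at hc
    split at hc
    · rcases List.mem_cons.mp hc with h | h
      · exact h ▸ pvDigitChar_mem ⟨n % 10, Nat.mod_lt _ (by norm_num)⟩
      · exact hacc _ h
    · refine ih (n / 10) _ ?_ c hc
      intro d hd
      rcases List.mem_cons.mp hd with h | h
      · exact h ▸ pvDigitChar_mem ⟨n % 10, Nat.mod_lt _ (by norm_num)⟩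
      · exact hacc _ h

theorem pvToChars_digits (n : Int) (hn : 0 ≤ n) :
    ∀ c ∈ PySem.Int.toChars n, c ∈ pvDigits := by
  unfold PySem.Int.toChars
  rw [if_neg (by omega)]
  exact pvToDigitsCore_digits _ _ [] (by simp)

theorem pvToChars_digit_lit (v : Int) (h0 : 0 ≤ v) (h9 : v ≤ 9) :
    PySem.Int.toChars v = [pvChr v] := by
  interval_cases v <;> rfl

theorem pvChr_val (c : Char) (hc : c ∈ pvDigits) : pvChr (pvVal c) = c := by
  fin_cases hc <;> rfl

theorem pvVal_chr (v : Int) (h0 : 0 ≤ v) (h9 : v ≤ 9) : pvVal (pvChr v) = v := by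
  interval_cases v <;> rfl

theorem pvOfChars_digit (c : Char) (hc : c ∈ pvDigits) :
    PySem.Int.ofChars? [c] = some (pvVal c) := by
  fin_cases hc <;> rfl

theorem pvVal_bounds (c : Char) (hc : c ∈ pvDigits) : 0 ≤ pvVal c ∧ pvVal c ≤ 9 := by
  fin_cases hc <;> decide

theorem pvIntAt_eq (cs : List Char) (hd : ∀ c ∈ cs, c ∈ pvDigits)
    (k : Nat) (hk : k < cs.length) : pvIntAt cs (k : Int) = pvVal cs[k] := by
  simp [pvIntAt, PySem.List.pyGet?_natCast, List.getElem?_eq_getElem hk,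
    pvOfChars_digit _ (hd _ (List.getElem_mem hk))]

theorem pvLoopA_eq_all (cs : List Char) (l : List Int) :
    pvLoopA cs l = l.all (fun i => pvIntAt cs (i - 1) == pvIntAt cs i + 1) := by
  induction l with
  | nil => rfl
  | cons i rest ih =>
    by_cases h : pvIntAt cs (i - 1) = pvIntAt cs i + 1
    · simp [pvLoopA, h, ih]
    · by_cases h10 : pvIntAt cs (i - 1) = 1 ∧ pvIntAt cs i = 0
      · exact absurd h10 (by intro ⟨a, b⟩; exact h (by omega))
      · simp [pvLoopA, h, h10]

def pvE (f : Int) (n : Nat) : List Char := (List.range n).map (fun k : Nat => pvChr (f - (k : Int)))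

theorem pvJoinE (f : Int) (n : Nat) (hb : ∀ k : Nat, k < n → 0 ≤ f - k ∧ f - k ≤ 9) :
    PySem.Chars.join []
      ((PySem.List.pyRange 0 (n : Int) 1).map (fun k => PySem.Int.toChars (f - k))) = pvE f n := by
  rw [PySem.List.pyRange_one]
  have h1 : ((n : Int) - 0).toNat = n := by omega
  rw [h1, List.map_map]
  rw [List.map_congr_left (g := fun k : Nat => [pvChr (f - k)]) (fun k hk => by
    have hk' := List.mem_range.mp hk
    simp only [Function.comp]
    rw [zero_add, pvToChars_digit_lit _ (hb k hk').1 (hb k hk').2])]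
  have h2 : (List.range n).map (fun k : Nat => [pvChr (f - k)]) = (pvE f n).map (fun c => [c]) := by
    unfold pvE; rw [List.map_map]; rfl
  rw [h2, PySem.Chars.join_nil_singletons]

-- A's loop accepts exactly the lists whose digit values count down from the first digit
theorem pvA_iff (cs : List Char) :
    (pvLoopA cs (PySem.List.pyRange 1 (cs.length : Int) 1) = true) ↔
    (∀ k : Nat, k < cs.length → pvIntAt cs (k : Int) = pvIntAt cs 0 - k) := by
  rw [pvLoopA_eq_all]
  simp only [List.all_eq_true, PySem.List.mem_pyRange_one, beq_iff_eq, and_imp]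
  constructor
  · intro h k
    induction k with
    | zero => intro _; simp
    | succ k ih =>
      intro hk
      have h1 := h ((k : Int) + 1) (by omega) (by omega)
      have e1 : (k : Int) + 1 - 1 = (k : Int) := by ring
      rw [e1] at h1
      have h2 := ih (by omega)
      have e2 : ((k + 1 : Nat) : Int) = (k : Int) + 1 := by push_cast; ring
      rw [e2]
      omega
  · intro h i h1 h2
    obtain ⟨k, rfl⟩ : ∃ k : Nat, i = (k : Int) + 1 := ⟨(i - 1).toNat, by omega⟩
    have ha := h (k + 1) (by omega)
    have hb := h k (by omega)
    have e2 : ((k + 1 : Nat) : Int) = (k : Int) + 1 := by push_cast; ring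
    rw [e2] at ha
    have e1 : (k : Int) + 1 - 1 = (k : Int) := by ring
    rw [e1]
    omega

-- the heart: on an all-digit character list, A's pair scan equals B's construct-and-compare
theorem pvKey (cs : List Char) (hd : ∀ c ∈ cs, c ∈ pvDigits) :
    pvLoopA cs (PySem.List.pyRange 1 (cs.length : Int) 1) =
    (if pvIntAt cs 0 - ((cs.length : Int) - 1) < 0 then false
     else decide (cs = PySem.Chars.join []
       ((PySem.List.pyRange 0 (cs.length : Int) 1).map
         (fun k => PySem.Int.toChars (pvIntAt cs 0 - k))))) := by
  rcases eq_or_ne cs [] with rfl | hne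
  · rfl
  · have hn : 0 < cs.length := List.length_pos_iff.mpr hne
    have hf0 : pvIntAt cs 0 = pvVal cs[0] := by
      have := pvIntAt_eq cs hd 0 hn; simpa using this
    have hfb := pvVal_bounds _ (hd _ (List.getElem_mem hn))
    split_ifs with hg
    · -- first digit too small for the length: A's scan must also fail
      rw [← Bool.not_eq_true, pvA_iff cs]
      intro hall
      have hlast := hall (cs.length - 1) (by omega)
      have he := pvIntAt_eq cs hd (cs.length - 1) (by omega)
      have hb := pvVal_bounds _ (hd _ (List.getElem_mem (show cs.length - 1 < cs.length by omega)))
      have hc : ((cs.length - 1 : Nat) : Int) = (cs.length : Int) - 1 := by omega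
      rw [hc] at hlast he
      omega
    · rw [Bool.eq_iff_iff, pvA_iff cs, decide_eq_true_iff]
      constructor
      · intro hP
        have hbnd : ∀ k : Nat, k < cs.length → 0 ≤ pvIntAt cs 0 - k ∧ pvIntAt cs 0 - k ≤ 9 := by
          intro k hk
          have h1 := hP k hk
          have h2 := pvIntAt_eq cs hd k hk
          have h3 := pvVal_bounds _ (hd _ (List.getElem_mem hk))
          omega
        rw [pvJoinE _ _ hbnd]
        refine List.ext_getElem (by simp [pvE]) ?_
        intro k h1 h2
        simp only [pvE, List.getElem_map, List.getElem_range]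
        have h4 := hP k h1
        have h5 := pvIntAt_eq cs hd k h1
        have h6 : pvIntAt cs 0 - (k : Int) = pvVal cs[k] := by omega
        rw [h6, pvChr_val _ (hd _ (List.getElem_mem h1))]
      · intro hE k hk
        have hbnd : ∀ j : Nat, j < cs.length → 0 ≤ pvIntAt cs 0 - j ∧ pvIntAt cs 0 - j ≤ 9 := by
          intro j hj
          have : (j : Int) ≤ (cs.length : Int) - 1 := by omega
          omega
        rw [pvJoinE _ _ hbnd] at hE
        have h5 := pvIntAt_eq cs hd k hk
        have h6 : cs[k] = pvChr (pvIntAt cs 0 - k) := by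
          rw [List.getElem_of_eq hE hk]
          simp [pvE]
        have h7 := pvVal_chr (pvIntAt cs 0 - k) (hbnd k hk).1 (hbnd k hk).2
        rw [h5, h6, h7]

-- ===== VERDICT (by name: the statement is the Claim_ definition above) =====
theorem sequential_decrementing_digits_spec : Claim_equal_sequential_decrementing_digits := by
  intro number _
  unfold Spec_sequential_decrementing_digits sequential_decrementing_digits sequential_decrementing_digits_alt
  by_cases h : number > 99
  · rw [if_pos h, if_neg (by omega)]
    simpa using pvKey (PySem.Int.toChars number) (pvToChars_digits number (by omega))
  · rw [if_neg h, if_pos (by omega)]
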